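-- pv_equiv track=rewrite | github.com/Riki-22/axia-tss | src/presentation/ui/streamlit/components/price_charts/chart_data_source.py | get_period_string
-- ===== SOURCE A (Python) =====
-- def get_period_string(days: int) -> str:
--     """
--     日数をYFinanceの期間文字列に変換
--
--     Args:
--         days: 日数
--
--     Returns:
--         str: 期間文字列（例: '1mo', '3mo'）
--     """
--     period_map = {
--         7: '7d',
--         14: '2wk',
--         30: '1mo',
--         60: '3mo',
--         180: '6mo',
--         365: '1y'
--     }
--
--     # 最も近い期間を選択
--     for d in sorted(period_map.keys()):
--         if days <= d:
--             return period_map[d]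
--     return '1y'
-- ===== SOURCE B (Python) =====
-- import bisect
--
-- _THRESHOLDS = [7, 14, 30, 60, 180, 365]
-- _PERIODS = ['7d', '2wk', '1mo', '3mo', '6mo', '1y']
--
-- def get_period_string(days: int) -> str:
--     i = bisect.bisect_left(_THRESHOLDS, days)
--     return _PERIODS[i] if i < len(_PERIODS) else '1y'
-- ===== Notes on version B (the rewrite author's own statement) =====
-- stated objective: idiomatic
-- what changed: Replaces the dict plus sorted-keys linear scan with two parallel sorted lists and a bisect_left binary search that indexes directly into the period list.
import Mathlib
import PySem

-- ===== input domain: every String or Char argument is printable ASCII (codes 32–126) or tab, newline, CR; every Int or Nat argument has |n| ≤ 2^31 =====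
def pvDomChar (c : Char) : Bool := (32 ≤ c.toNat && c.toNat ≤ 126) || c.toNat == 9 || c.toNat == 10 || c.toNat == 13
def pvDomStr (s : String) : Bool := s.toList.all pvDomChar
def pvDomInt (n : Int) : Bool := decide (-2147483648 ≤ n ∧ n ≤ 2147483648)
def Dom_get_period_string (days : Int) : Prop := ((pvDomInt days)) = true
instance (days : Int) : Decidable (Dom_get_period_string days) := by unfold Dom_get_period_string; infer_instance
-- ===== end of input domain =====

-- B replaces the dict + sorted-keys linear scan with a bisect_left binary search into two parallel sorted lists (idiomatic).


-- ===== PORT A =====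
-- the dict literal
def pvPeriodMap : PySem.Dict Int String :=
  PySem.Dict.ofList [(7, "7d"), (14, "2wk"), (30, "1mo"), (60, "3mo"), (180, "6mo"), (365, "1y")]

-- 'for d in sorted(period_map.keys()): if days <= d: return period_map[d]' ; falls through to '1y'.
-- period_map[d] is a lookup of a key known to be present; the .getD default is unreachable for keys of the map.
def pvScanA (days : Int) (m : PySem.Dict Int String) : List Int → String
  | [] => "1y"
  | d :: rest => if days ≤ d then (PySem.Dict.get? m d).getD "1y" else pvScanA days m rest

def get_period_string (days : Int) : String :=
  pvScanA days pvPeriodMap (PySem.List.sorted pvPeriodMap.keys (fun x => x) false)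

-- ===== PORT B =====
def pvThresholds : List Int := [7, 14, 30, 60, 180, 365]
def pvPeriods : List String := ["7d", "2wk", "1mo", "3mo", "6mo", "1y"]

def get_period_string_alt (days : Int) : String :=
  let i := PySem.List.bisectLeft pvThresholds days
  if i < pvPeriods.length then pvPeriods.getD i "1y" else "1y"

-- ===== PRECONDITION & SPEC =====
def Spec_get_period_string (days : Int) (out : String) : Prop := out = get_period_string_alt days
instance (days : Int) (out : String) : Decidable (Spec_get_period_string days out) := by unfold Spec_get_period_string; infer_instance

-- ===== CLAIM (what is proved, stated in full; the proofs are below) =====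
def Claim_equal_get_period_string : Prop := ∀ (days : Int), Dom_get_period_string days → Spec_get_period_string days (get_period_string days)

-- ===== LEMMAS AND PROOFS =====

-- the sorted dict keys, evaluated once
theorem pvKeysSorted :
    PySem.List.sorted pvPeriodMap.keys (fun x => x) false = [7, 14, 30, 60, 180, 365] := by
  decide

-- ===== VERDICT (by name: the statement is the Claim_ definition above) =====
theorem get_period_string_spec : Claim_equal_get_period_string := by
  intro days _
  unfold Spec_get_period_string get_period_string get_period_string_alt
  rw [pvKeysSorted]
  by_cases h1 : days ≤ 7
  · simp [pvScanA, h1, pvPeriodMap, pvThresholds, pvPeriods,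
      PySem.List.bisectLeft, PySem.List.bisectLeftLoop] <;> split_ifs <;> first | rfl | omega
  · by_cases h2 : days ≤ 14
    · simp [pvScanA, h1, h2, pvPeriodMap, pvThresholds, pvPeriods,
        PySem.List.bisectLeft, PySem.List.bisectLeftLoop] <;> split_ifs <;> first | rfl | omega
    · by_cases h3 : days ≤ 30
      · simp [pvScanA, h1, h2, h3, pvPeriodMap, pvThresholds, pvPeriods,
          PySem.List.bisectLeft, PySem.List.bisectLeftLoop] <;> split_ifs <;> first | rfl | omega
      · by_cases h4 : days ≤ 60
        · simp [pvScanA, h1, h2, h3, h4, pvPeriodMap, pvThresholds, pvPeriods,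
            PySem.List.bisectLeft, PySem.List.bisectLeftLoop] <;> split_ifs <;> first | rfl | omega
        · by_cases h5 : days ≤ 180
          · simp [pvScanA, h1, h2, h3, h4, h5, pvPeriodMap, pvThresholds, pvPeriods,
              PySem.List.bisectLeft, PySem.List.bisectLeftLoop] <;> split_ifs <;> first | rfl | omega
          · by_cases h6 : days ≤ 365
            · simp [pvScanA, h1, h2, h3, h4, h5, h6, pvPeriodMap, pvThresholds, pvPeriods,
                PySem.List.bisectLeft, PySem.List.bisectLeftLoop] <;> split_ifs <;> first | rfl | omega
            · simp [pvScanA, h1, h2, h3, h4, h5, h6, pvThresholds, pvPeriods,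
                PySem.List.bisectLeft, PySem.List.bisectLeftLoop] <;> split_ifs <;> first | rfl | omega
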